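-- pv_equiv track=rewrite | github.com/CodingTestKiller/Season3 | 4주차/부대복귀/ironAiken2.py | solution
-- ===== SOURCE A (Python) =====
-- from collections import deque
--
-- def solution(n, roads, sources, destination):
--     graph = [[] for _ in range(n+1)]
--     for road in roads:
--         graph[road[0]].append(road[1])
--         graph[road[1]].append(road[0])
--
--     dist = [-1] * (n+1)
--     dist[destination] = 0
--     queue = deque([destination])
--     while queue:
--         now = queue.popleft()
--         for node in graph[now]:
--             if dist[node] == -1:
--                 dist[node] = dist[now] + 1
--                 queue.append(node)
--
--     ans = []
--     for s in sources:
--         ans.append(dist[s])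
--
--     return ans
-- ===== SOURCE B (Python) =====
-- def solution(n, roads, sources, destination):
--     # Stage 1: flatten the undirected roads into a directed arc list.
--     arcs = []
--     for road in roads:
--         arcs.append((road[0], road[1]))
--         arcs.append((road[1], road[0]))
--     graph = [[] for _ in range(n + 1)]
--     for u, v in arcs:
--         graph[u].append(v)
--
--     # Stage 2: level-synchronous BFS over whole frontier lists with a level counter.
--     dist = [-1] * (n + 1)
--     dist[destination] = 0
--     frontier = [destination]
--     d = 0
--     while frontier:
--         d += 1
--         nxt = []
--         for node in frontier:
--             for nb in graph[node]:
--                 if dist[nb] == -1: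
--                     dist[nb] = d
--                     nxt.append(nb)
--         frontier = nxt
--
--     return [dist[s] for s in sources]
-- ===== Notes on version B (the rewrite author's own statement) =====
-- stated objective: alternative
-- what changed: Replaces the deque one-node-at-a-time BFS (distance read back from dist[now]) by a staged design: a first pass flattens the roads into a directed arc list that a second pass groups into the adjacency table, and the search is a level-synchronous BFS that expands whole frontier lists round by round with an explicit level counter instead of popping single nodes from a deque.
import Mathlib
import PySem

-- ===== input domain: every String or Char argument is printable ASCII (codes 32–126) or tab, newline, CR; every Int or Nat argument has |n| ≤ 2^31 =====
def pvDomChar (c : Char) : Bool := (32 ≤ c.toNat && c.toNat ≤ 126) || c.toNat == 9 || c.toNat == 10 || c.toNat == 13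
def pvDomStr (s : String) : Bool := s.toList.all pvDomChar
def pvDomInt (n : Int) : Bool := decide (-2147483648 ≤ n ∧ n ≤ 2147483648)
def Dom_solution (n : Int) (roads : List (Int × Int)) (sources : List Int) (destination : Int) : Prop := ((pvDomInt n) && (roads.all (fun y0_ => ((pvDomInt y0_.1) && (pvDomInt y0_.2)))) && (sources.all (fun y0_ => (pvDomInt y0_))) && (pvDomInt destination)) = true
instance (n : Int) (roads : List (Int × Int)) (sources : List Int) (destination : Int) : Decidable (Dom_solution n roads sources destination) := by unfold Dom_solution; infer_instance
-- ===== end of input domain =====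

-- B replaces A's deque node-at-a-time BFS by a staged design: the roads are first flattened into a
-- directed arc list and grouped into the adjacency table, then a level-synchronous BFS expands whole
-- frontier lists round by round with an explicit level counter; same return value, no speed claim.

-- ===== PORT A =====
-- graph[a].append(b) with Python list-index semantics
def pvAddEdge (g : List (List Int)) (a b : Int) : List (List Int) :=
  PySem.List.pySetD g a (PySem.List.pyGetD g a [] ++ [b])

-- body of A's inner 'for node in graph[now]' loop; state = (dist, queue after popleft)
def pvInnerA (now : Int) (p : List Int × List Int) (node : Int) : List Int × List Int :=
  if PySem.List.pyGetD p.1 node 0 == -1 then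
    (PySem.List.pySetD p.1 node (PySem.List.pyGetD p.1 now 0 + 1), p.2 ++ [node])
  else p

-- A's 'while queue' loop; the fuel n+2 bounds the number of pops (1 initial node + at most n+1 appends)
def pvBfsA (g : List (List Int)) : Nat → List Int → List Int → List Int
  | 0, dist, _ => dist
  | _ + 1, dist, [] => dist
  | f + 1, dist, now :: rest =>
    let p := (PySem.List.pyGetD g now []).foldl (pvInnerA now) (dist, rest)
    pvBfsA g f p.1 p.2

def solution (n : Int) (roads : List (Int × Int)) (sources : List Int) (destination : Int) : List Int :=
  let N := (n + 1).toNat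
  let graph := roads.foldl (fun g r => pvAddEdge (pvAddEdge g r.1 r.2) r.2 r.1) (List.replicate N ([] : List Int))
  let dist0 := PySem.List.pySetD (List.replicate N (-1 : Int)) destination 0
  let dist := pvBfsA graph (N + 1) dist0 [destination]
  sources.foldl (fun acc s => acc ++ [PySem.List.pyGetD dist s 0]) []

-- ===== PORT B =====
-- B's inner 'for nb in graph[node]' loop as structural recursion over the neighbour list
def pvScanNbrs (dist : List Int) (nxt : List Int) (d : Int) : List Int → List Int × List Int
  | [] => (dist, nxt)
  | nb :: rest =>
    if PySem.List.pyGetD dist nb 0 == -1 then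
      pvScanNbrs (PySem.List.pySetD dist nb d) (nxt ++ [nb]) d rest
    else
      pvScanNbrs dist nxt d rest

-- B's 'for node in frontier' loop as structural recursion over the frontier
def pvScanFrontier (g : List (List Int)) (d : Int) (dist : List Int) (nxt : List Int) : List Int → List Int × List Int
  | [] => (dist, nxt)
  | u :: rest =>
    let p := pvScanNbrs dist nxt d (PySem.List.pyGetD g u [])
    pvScanFrontier g d p.1 p.2 rest

-- B's 'while frontier' rounds with the level counter d; the fuel n+2 bounds the number of rounds
def pvRounds (g : List (List Int)) : Nat → Int → List Int × List Int → List Int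
  | 0, _, st => st.1
  | f + 1, d, st =>
    if st.2.isEmpty then st.1
    else pvRounds g f (d + 1) (pvScanFrontier g (d + 1) st.1 [] st.2)

def solution_alt (n : Int) (roads : List (Int × Int)) (sources : List Int) (destination : Int) : List Int :=
  let m := (n + 1).toNat
  let arcs := roads.foldl (fun acc road => acc ++ [(road.1, road.2), (road.2, road.1)]) []
  let graph := arcs.foldl (fun g e => PySem.List.pySetD g e.1 (PySem.List.pyGetD g e.1 [] ++ [e.2])) (List.replicate m ([] : List Int))
  let dist := pvRounds graph (m + 1) 0 (PySem.List.pySetD (List.replicate m (-1 : Int)) destination 0, [destination])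
  sources.map (fun s => PySem.List.pyGetD dist s 0)

-- ===== PRECONDITION & SPEC =====
-- Pre_ is exactly A's no-raise condition: every node label used as an index must be a valid Python
-- index into a list of length n+1 (so -(n+1) ≤ x ≤ n; negative labels index with the same Python
-- wraparound in both programs), and 0 ≤ n (for n < 0 the dist list is empty and dist[destination] raises).
def Pre_solution (n : Int) (roads : List (Int × Int)) (sources : List Int) (destination : Int) : Prop :=
  0 ≤ n ∧ (-(n + 1) ≤ destination ∧ destination ≤ n) ∧
    (∀ r ∈ roads, (-(n + 1) ≤ r.1 ∧ r.1 ≤ n) ∧ (-(n + 1) ≤ r.2 ∧ r.2 ≤ n)) ∧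
    (∀ s ∈ sources, -(n + 1) ≤ s ∧ s ≤ n)
instance (n : Int) (roads : List (Int × Int)) (sources : List Int) (destination : Int) : Decidable (Pre_solution n roads sources destination) := by unfold Pre_solution; infer_instance

def pvWitness_solution : Int × (List (Int × Int)) × List Int × Int := (3, [(1, 2), (2, 3)], [1, 3, 0], 2)

def Spec_solution (n : Int) (roads : List (Int × Int)) (sources : List Int) (destination : Int) (out : List Int) : Prop := out = solution_alt n roads sources destination
instance (n : Int) (roads : List (Int × Int)) (sources : List Int) (destination : Int) (out : List Int) : Decidable (Spec_solution n roads sources destination out) := by unfold Spec_solution; infer_instance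

-- ===== CLAIM (what is proved, stated in full; the proofs are below) =====
def Claim_equal_solution : Prop := ∀ (n : Int) (roads : List (Int × Int)) (sources : List Int) (destination : Int), Dom_solution n roads sources destination → Pre_solution n roads sources destination → Spec_solution n roads sources destination (solution n roads sources destination)

-- ===== LEMMAS AND PROOFS =====

-- proof-side fold views of B's recursions
def pvInnerB (v : Int) (p : List Int × List Int) (nb : Int) : List Int × List Int :=
  if PySem.List.pyGetD p.1 nb 0 == -1 then
    (PySem.List.pySetD p.1 nb v, p.2 ++ [nb])
  else p

def pvLevelB (g : List (List Int)) (v : Int) (p : List Int × List Int) (node : Int) : List Int × List Int :=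
  (PySem.List.pyGetD g node []).foldl (pvInnerB v) p

def pvBfsB (g : List (List Int)) : Nat → List Int → List Int → Int → List Int
  | 0, dist, _, _ => dist
  | _ + 1, dist, [], _ => dist
  | f + 1, dist, x :: fr, d =>
    let p := (x :: fr).foldl (pvLevelB g (d + 1)) (dist, [])
    pvBfsB g f p.1 p.2 (d + 1)

lemma pvScanNbrs_eq (d : Int) : ∀ (nbs dist nxt : List Int),
    pvScanNbrs dist nxt d nbs = nbs.foldl (pvInnerB d) (dist, nxt) := by
  intro nbs
  induction nbs with
  | nil => intro dist nxt; rfl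
  | cons nb rest ih =>
    intro dist nxt
    simp only [pvScanNbrs, List.foldl_cons, pvInnerB]
    split <;> rw [ih]

lemma pvScanFrontier_eq (g : List (List Int)) (d : Int) : ∀ (fr dist nxt : List Int),
    pvScanFrontier g d dist nxt fr = fr.foldl (pvLevelB g d) (dist, nxt) := by
  intro fr
  induction fr with
  | nil => intro dist nxt; rfl
  | cons u rest ih =>
    intro dist nxt
    simp only [pvScanFrontier, List.foldl_cons, pvLevelB, pvScanNbrs_eq]
    rw [ih]

lemma pvRounds_eq (g : List (List Int)) : ∀ (f : Nat) (dist fr : List Int) (d : Int),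
    pvRounds g f d (dist, fr) = pvBfsB g f dist fr d := by
  intro f
  induction f with
  | zero => intro dist fr d; rfl
  | succ f ih =>
    intro dist fr d
    cases fr with
    | nil => rfl
    | cons x rest =>
      show pvRounds g (f + 1) d (dist, x :: rest) = _
      rw [pvRounds, if_neg (by simp)]
      rw [pvScanFrontier_eq]
      rw [ih]
      rfl

lemma pvArcs_acc (roads : List (Int × Int)) : ∀ acc : List (Int × Int),
    roads.foldl (fun acc road => acc ++ [(road.1, road.2), (road.2, road.1)]) acc
      = acc ++ roads.foldl (fun acc road => acc ++ [(road.1, road.2), (road.2, road.1)]) [] := by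
  induction roads with
  | nil => intro acc; simp
  | cons r rest ih =>
    intro acc
    simp only [List.foldl_cons]
    rw [ih (acc ++ _), ih ([] ++ _)]
    simp

lemma pvBuild_eq : ∀ (roads : List (Int × Int)) (g : List (List Int)),
    (roads.foldl (fun acc road => acc ++ [(road.1, road.2), (road.2, road.1)]) []).foldl
        (fun g e => PySem.List.pySetD g e.1 (PySem.List.pyGetD g e.1 [] ++ [e.2])) g
      = roads.foldl (fun g r => pvAddEdge (pvAddEdge g r.1 r.2) r.2 r.1) g := by
  intro roads
  induction roads with
  | nil => intro g; rfl
  | cons r rest ih =>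
    intro g
    simp only [List.foldl_cons]
    rw [pvArcs_acc, List.nil_append, List.foldl_append]
    rw [ih]
    rfl

def pvNidx (len : Nat) (i : Int) : Nat := if 0 ≤ i then i.toNat else len - (-i).toNat

def pvVIdx (len : Nat) (i : Int) : Prop := -(len : Int) ≤ i ∧ i < len

def pvCnt (xs : List Int) : Nat := xs.countP (fun x => x == -1)

lemma pvNidx_lt {len : Nat} {i : Int} (h : pvVIdx len i) : pvNidx len i < len := by
  rcases h with ⟨h1, h2⟩; unfold pvNidx; split <;> omega

lemma pvGetD_valid {α : Type} (xs : List α) (i : Int) (d : α) (h : pvVIdx xs.length i) :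
    PySem.List.pyGetD xs i d = xs.getD (pvNidx xs.length i) d := by
  rcases h with ⟨h1, h2⟩
  simp only [PySem.List.pyGetD, PySem.List.pyGet?, PySem.List.pyIdx?, pvNidx]
  split
  · simp [List.getD]
  · simp [List.getD]

lemma pvSetD_valid {α : Type} (xs : List α) (i : Int) (v : α) (h : pvVIdx xs.length i) :
    PySem.List.pySetD xs i v = xs.set (pvNidx xs.length i) v := by
  rcases h with ⟨h1, h2⟩
  simp only [PySem.List.pySetD, PySem.List.pySet?, PySem.List.pyIdx?, pvNidx]
  split
  · simp
  · simp

lemma pvCnt_set (xs : List Int) (j : Nat) (v : Int) (hj : j < xs.length)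
    (hx : xs.getD j 0 = -1) (hv : v ≠ -1) : pvCnt (xs.set j v) + 1 = pvCnt xs := by
  unfold pvCnt
  induction xs generalizing j with
  | nil => simp at hj
  | cons a t ih =>
    cases j with
    | zero => simp_all
    | succ k =>
      simp only [List.set_cons_succ, List.countP_cons]
      have := ih k (by simpa using hj) (by simpa using hx)
      omega

lemma getD_set_ne (xs : List Int) (j k : Nat) (v : Int) (h : j ≠ k) :
    (xs.set j v).getD k 0 = xs.getD k 0 := by
  simp [List.getD, List.getElem?_set_ne h]

lemma getD_set_self (xs : List Int) (j : Nat) (v : Int) (hj : j < xs.length) :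
    (xs.set j v).getD j 0 = v := by
  simp [List.getD, hj]

-- queue component only grows by appends; dist component ignores the queue

lemma pvInnerB_shift (v : Int) : ∀ (nbs : List Int) (dist : List Int) (q : List Int),
    nbs.foldl (pvInnerB v) (dist, q)
      = ((nbs.foldl (pvInnerB v) (dist, [])).1, q ++ (nbs.foldl (pvInnerB v) (dist, [])).2) := by
  intro nbs
  induction nbs with
  | nil => intro dist q; simp
  | cons nb rest ih =>
    intro dist q
    simp only [List.foldl_cons]
    by_cases h : PySem.List.pyGetD dist nb 0 == -1
    · simp only [pvInnerB]
      rw [if_pos h, if_pos h]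
      rw [ih _ (q ++ [nb]), ih _ ([] ++ [nb])]
      simp
    · simp only [pvInnerB, h]
      exact ih dist q

lemma pvInnerA_eq_pvInnerB (v : Int) (hv0 : v ≠ 0) (now : Int) :
    ∀ (nbs : List Int) (dist : List Int) (q : List Int),
    (∀ x ∈ nbs, pvVIdx dist.length x) →
    pvVIdx dist.length now →
    dist.getD (pvNidx dist.length now) 0 = v - 1 →
    nbs.foldl (pvInnerA now) (dist, q) = nbs.foldl (pvInnerB v) (dist, q) := by
  intro nbs
  induction nbs with
  | nil => intro dist q _ _ _; rfl
  | cons nb rest ih =>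
    intro dist q hval hnow hd
    simp only [List.foldl_cons]
    by_cases h : PySem.List.pyGetD dist nb 0 == -1
    · have hnb : pvVIdx dist.length nb := hval nb (by simp)
      have hcell : dist.getD (pvNidx dist.length nb) 0 = -1 := by
        rw [pvGetD_valid dist nb 0 hnb] at h; simpa using h
      have hne : pvNidx dist.length nb ≠ pvNidx dist.length now := by
        intro he; rw [he, hd] at hcell; omega
      simp only [pvInnerA, pvInnerB]
      rw [if_pos h, if_pos h, pvGetD_valid dist now 0 hnow, hd]
      have hv' : v - 1 + 1 = v := by ring
      rw [hv']
      set dist' := PySem.List.pySetD dist nb v with hdist'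
      have hlen : dist'.length = dist.length := by
        rw [hdist', pvSetD_valid dist nb v hnb]; simp
      apply ih dist' (q ++ [nb])
      · intro x hx; rw [hlen]; exact hval x (by simp [hx])
      · rw [hlen]; exact hnow
      · rw [hlen, hdist', pvSetD_valid dist nb v hnb, getD_set_ne _ _ _ _ hne]
        exact hd
    · simp only [pvInnerA, pvInnerB, h]
      exact ih dist q (fun x hx => hval x (by simp [hx])) hnow hd

lemma pvInnerB_spec (v : Int) (hv : v ≠ -1) :
    ∀ (nbs : List Int) (dist : List Int),
    (∀ x ∈ nbs, pvVIdx dist.length x) →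
    (nbs.foldl (pvInnerB v) (dist, [])).1.length = dist.length ∧
    pvCnt (nbs.foldl (pvInnerB v) (dist, [])).1 + (nbs.foldl (pvInnerB v) (dist, [])).2.length = pvCnt dist ∧
    (∀ j, dist.getD j 0 ≠ -1 → (nbs.foldl (pvInnerB v) (dist, [])).1.getD j 0 = dist.getD j 0) ∧
    (∀ y ∈ (nbs.foldl (pvInnerB v) (dist, [])).2,
        pvVIdx dist.length y ∧ (nbs.foldl (pvInnerB v) (dist, [])).1.getD (pvNidx dist.length y) 0 = v) := by
  intro nbs
  induction nbs with
  | nil => intro dist _; refine ⟨rfl, by simp, fun j _ => rfl, by simp⟩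
  | cons nb rest ih =>
    intro dist hval
    simp only [List.foldl_cons]
    by_cases h : PySem.List.pyGetD dist nb 0 == -1
    · have hnb : pvVIdx dist.length nb := hval nb (by simp)
      have hcell : dist.getD (pvNidx dist.length nb) 0 = -1 := by
        rw [pvGetD_valid dist nb 0 hnb] at h; simpa using h
      simp only [pvInnerB]
      rw [if_pos h]
      set dist' := PySem.List.pySetD dist nb v with hdist'
      have hset : dist' = dist.set (pvNidx dist.length nb) v := pvSetD_valid dist nb v hnb
      have hlen : dist'.length = dist.length := by rw [hset]; simp
      have hvalr : ∀ x ∈ rest, pvVIdx dist'.length x := by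
        intro x hx; rw [hlen]; exact hval x (by simp [hx])
      obtain ⟨ihlen, ihcnt, ihpres, ihnew⟩ := ih dist' hvalr
      rw [pvInnerB_shift v rest dist' ([] ++ [nb])]
      refine ⟨by rw [ihlen, hlen], ?_, ?_, ?_⟩
      · have hc : pvCnt dist' + 1 = pvCnt dist := by
          rw [hset]
          exact pvCnt_set dist _ v (pvNidx_lt hnb) hcell hv
        simp only [List.length_append, List.length_cons, List.length_nil, List.nil_append]
        omega
      · intro j hj
        have hjne : j ≠ pvNidx dist.length nb := by
          intro he; rw [he] at hj; exact hj hcell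
        have : dist'.getD j 0 = dist.getD j 0 := by
          rw [hset]; exact getD_set_ne _ _ _ _ (fun he => hjne he.symm)
        rw [ihpres j (by rw [this]; exact hj), this]
      · intro y hy
        simp only [List.nil_append] at hy
        rcases List.mem_append.mp hy with hy1 | hy2
        · have hynb : y = nb := by simpa using hy1
          subst hynb
          refine ⟨hnb, ?_⟩
          have hd' : dist'.getD (pvNidx dist.length y) 0 = v := by
            rw [hset]; exact getD_set_self _ _ _ (pvNidx_lt hnb)
          rw [ihpres _ (by rw [hd']; exact hv), hd']
        · have := ihnew y hy2
          rw [hlen] at this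
          exact this
    · simp only [pvInnerB, h]
      exact ih dist (fun x hx => hval x (by simp [hx]))

lemma pvBfsA_nil (g : List (List Int)) (fA : Nat) (dist : List Int) :
    pvBfsA g fA dist [] = dist := by cases fA <;> rfl

lemma pvBfsB_nil (g : List (List Int)) (fB : Nat) (dist : List Int) (d : Int) :
    pvBfsB g fB dist [] d = dist := by cases fB <;> rfl

lemma pvAdjValid (g : List (List Int)) (N : Nat) (hgl : g.length = N)
    (hg : ∀ l ∈ g, ∀ x ∈ l, pvVIdx N x) (now : Int) (hnow : pvVIdx N now) :
    ∀ x ∈ PySem.List.pyGetD g now [], pvVIdx N x := by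
  intro x hx
  rw [pvGetD_valid g now [] (by rw [hgl]; exact hnow)] at hx
  rw [hgl] at hx
  rw [List.getD_eq_getElem _ _ (by rw [hgl]; exact pvNidx_lt hnow)] at hx
  exact hg _ (List.getElem_mem _) x hx

lemma pvKey (g : List (List Int)) (N : Nat) (hgl : g.length = N)
    (hg : ∀ l ∈ g, ∀ x ∈ l, pvVIdx N x) :
    ∀ (k fA fB : Nat) (dist : List Int) (F₁ F₂ : List Int) (d : Int),
    dist.length = N → 0 ≤ d →
    (∀ x ∈ F₁, pvVIdx N x ∧ dist.getD (pvNidx N x) 0 = d) →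
    (∀ y ∈ F₂, pvVIdx N y ∧ dist.getD (pvNidx N y) 0 = d + 1) →
    2 * (pvCnt dist + F₁.length + F₂.length) + (if F₁ = [] then 1 else 0) ≤ k →
    pvCnt dist + F₁.length + F₂.length ≤ fA →
    pvCnt dist + F₂.length ≤ fB →
    pvBfsA g fA dist (F₁ ++ F₂)
      = pvBfsB g fB (F₁.foldl (pvLevelB g (d + 1)) (dist, F₂)).1
          (F₁.foldl (pvLevelB g (d + 1)) (dist, F₂)).2 (d + 1) := by
  intro k
  induction k using Nat.strong_induction_on with
  | _ k IH =>
  intro fA fB dist F₁ F₂ d hdl hd hF1 hF2 hk hfA hfB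
  cases F₁ with
  | nil =>
    simp only [List.foldl_nil, List.nil_append]
    rw [if_pos rfl] at hk
    cases F₂ with
    | nil => rw [pvBfsA_nil, pvBfsB_nil]
    | cons x F₂' =>
      cases fB with
      | zero => exfalso; simp only [List.length_cons] at hfB; omega
      | succ fB' =>
        show pvBfsA g fA dist (x :: F₂') = pvBfsB g (fB' + 1) dist (x :: F₂') (d + 1)
        rw [show pvBfsB g (fB' + 1) dist (x :: F₂') (d + 1)
            = pvBfsB g fB' ((x :: F₂').foldl (pvLevelB g (d + 1 + 1)) (dist, [])).1
                ((x :: F₂').foldl (pvLevelB g (d + 1 + 1)) (dist, [])).2 (d + 1 + 1) from rfl]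
        have := IH (2 * (pvCnt dist + (x :: F₂').length + 0) + (if (x :: F₂') = ([] : List Int) then 1 else 0))
          (by rw [if_neg (by simp)]; simp only [List.length_cons, List.length_nil] at hk ⊢; omega)
          fA fB' dist (x :: F₂') [] (d + 1) hdl (by omega) hF2 (by simp)
          (le_refl _)
          (by simpa using hfA)
          (by simp only [List.length_cons, List.length_nil] at hfB ⊢; omega)
        simpa using this
  | cons now rest =>
    have hnow := (hF1 now (by simp)).1
    have hnowd := (hF1 now (by simp)).2
    have hnbs : ∀ x ∈ PySem.List.pyGetD g now [], pvVIdx N x := pvAdjValid g N hgl hg now hnow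
    cases fA with
    | zero => exfalso; simp only [List.length_cons] at hfA; omega
    | succ fA' =>
      show pvBfsA g (fA' + 1) dist (now :: (rest ++ F₂)) = _
      rw [show pvBfsA g (fA' + 1) dist (now :: (rest ++ F₂))
          = pvBfsA g fA'
              ((PySem.List.pyGetD g now []).foldl (pvInnerA now) (dist, rest ++ F₂)).1
              ((PySem.List.pyGetD g now []).foldl (pvInnerA now) (dist, rest ++ F₂)).2 from rfl]
      set nbs := PySem.List.pyGetD g now [] with hnbsdef
      have hAB : nbs.foldl (pvInnerA now) (dist, rest ++ F₂) = nbs.foldl (pvInnerB (d + 1)) (dist, rest ++ F₂) := by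
        apply pvInnerA_eq_pvInnerB (d + 1) (by omega) now nbs dist (rest ++ F₂)
        · intro x hx; rw [hdl]; exact hnbs x hx
        · rw [hdl]; exact hnow
        · rw [hdl]; rw [hnowd]; ring
      set D' := (nbs.foldl (pvInnerB (d + 1)) (dist, [])).1 with hD'
      set new := (nbs.foldl (pvInnerB (d + 1)) (dist, [])).2 with hnew
      have hshift := pvInnerB_shift (d + 1) nbs dist (rest ++ F₂)
      obtain ⟨slen, scnt, spres, snew⟩ := pvInnerB_spec (d + 1) (by omega) nbs dist (by intro x hx; rw [hdl]; exact hnbs x hx)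
      rw [← hD', ← hnew] at hshift scnt snew
      rw [← hD'] at slen spres
      rw [hdl] at slen snew
      -- RHS first step
      have hlvl : pvLevelB g (d + 1) (dist, F₂) now = (D', F₂ ++ new) := by
        simp only [pvLevelB]
        rw [← hnbsdef, pvInnerB_shift (d + 1) nbs dist F₂, ← hD', ← hnew]
      rw [List.foldl_cons, hlvl, hAB, hshift]
      have hD'len : D'.length = N := slen
      have hpres : ∀ i : Int, pvVIdx N i → dist.getD (pvNidx N i) 0 ≠ -1 →
          D'.getD (pvNidx N i) 0 = dist.getD (pvNidx N i) 0 := fun i _ hne => spres _ hne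
      have hF1' : ∀ x ∈ rest, pvVIdx N x ∧ D'.getD (pvNidx N x) 0 = d := by
        intro x hx
        have := hF1 x (by simp [hx])
        exact ⟨this.1, by rw [hpres x this.1 (by rw [this.2]; omega), this.2]⟩
      have hF2' : ∀ y ∈ F₂ ++ new, pvVIdx N y ∧ D'.getD (pvNidx N y) 0 = d + 1 := by
        intro y hy
        rcases List.mem_append.mp hy with hy1 | hy2
        · have := hF2 y hy1
          exact ⟨this.1, by rw [hpres y this.1 (by rw [this.2]; omega), this.2]⟩
        · exact snew y hy2
      have hcnt : pvCnt D' + new.length = pvCnt dist := scnt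
      rw [if_neg (by simp)] at hk
      have hm := IH (2 * (pvCnt D' + rest.length + (F₂ ++ new).length) + (if rest = ([] : List Int) then 1 else 0))
        (by have h1 : (if rest = ([] : List Int) then 1 else 0) ≤ 1 := by split <;> omega
            simp only [List.length_append, List.length_cons] at hk ⊢; omega)
        fA' fB D' rest (F₂ ++ new) d hD'len hd hF1' hF2'
        (le_refl _)
        (by simp only [List.length_append, List.length_cons] at hfA ⊢; omega)
        (by simp only [List.length_append] at hfB ⊢; omega)
      rw [List.append_assoc]
      exact hm

lemma pvAddEdge_spec (N : Nat) (g : List (List Int)) (a b : Int)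
    (hgl : g.length = N) (hg : ∀ l ∈ g, ∀ x ∈ l, pvVIdx N x)
    (ha : pvVIdx N a) (hb : pvVIdx N b) :
    (pvAddEdge g a b).length = N ∧ ∀ l ∈ pvAddEdge g a b, ∀ x ∈ l, pvVIdx N x := by
  unfold pvAddEdge
  rw [pvSetD_valid g a _ (by rw [hgl]; exact ha)]
  constructor
  · simp [hgl]
  · intro l hl x hx
    rcases List.mem_or_eq_of_mem_set hl with hmem | heq
    · exact hg l hmem x hx
    · subst heq
      rcases List.mem_append.mp hx with h1 | h2
      · have hlt : pvNidx g.length a < g.length := by rw [hgl]; exact pvNidx_lt ha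
        rw [pvGetD_valid g a [] (by rw [hgl]; exact ha), List.getD_eq_getElem _ _ hlt] at h1
        exact hg _ (List.getElem_mem _) x h1
      · rw [List.mem_singleton.mp h2]; exact hb

lemma pvBuild_spec (N : Nat) : ∀ (roads : List (Int × Int)) (g : List (List Int)),
    g.length = N → (∀ l ∈ g, ∀ x ∈ l, pvVIdx N x) →
    (∀ r ∈ roads, pvVIdx N r.1 ∧ pvVIdx N r.2) →
    (roads.foldl (fun g r => pvAddEdge (pvAddEdge g r.1 r.2) r.2 r.1) g).length = N ∧
    (∀ l ∈ roads.foldl (fun g r => pvAddEdge (pvAddEdge g r.1 r.2) r.2 r.1) g, ∀ x ∈ l, pvVIdx N x) := by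
  intro roads
  induction roads with
  | nil => intro g h1 h2 _; exact ⟨h1, h2⟩
  | cons r rest ih =>
    intro g h1 h2 hval
    have hr := hval r (by simp)
    obtain ⟨l1, e1⟩ := pvAddEdge_spec N g r.1 r.2 h1 h2 hr.1 hr.2
    obtain ⟨l2, e2⟩ := pvAddEdge_spec N _ r.2 r.1 l1 e1 hr.2 hr.1
    exact ih _ l2 e2 (fun x hx => hval x (by simp [hx]))

lemma pvCnt_replicate (N : Nat) : pvCnt (List.replicate N (-1 : Int)) = N := by
  unfold pvCnt
  induction N with
  | zero => rfl
  | succ m ih => simp [List.replicate_succ, ih]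

theorem solution_eq (n : Int) (roads : List (Int × Int)) (sources : List Int) (destination : Int)
    (hn : 0 ≤ n) (hdest : -(n + 1) ≤ destination ∧ destination ≤ n)
    (hroads : ∀ r ∈ roads, (-(n + 1) ≤ r.1 ∧ r.1 ≤ n) ∧ (-(n + 1) ≤ r.2 ∧ r.2 ≤ n)) :
    solution n roads sources destination = solution_alt n roads sources destination := by
  show (let N := (n + 1).toNat;
    let graph := roads.foldl (fun g r => pvAddEdge (pvAddEdge g r.1 r.2) r.2 r.1) (List.replicate N ([] : List Int));
    let dist0 := PySem.List.pySetD (List.replicate N (-1 : Int)) destination 0;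
    let dist := pvBfsA graph (N + 1) dist0 [destination];
    sources.foldl (fun acc s => acc ++ [PySem.List.pyGetD dist s 0]) []) =
    (let m := (n + 1).toNat;
    let arcs := roads.foldl (fun acc road => acc ++ [(road.1, road.2), (road.2, road.1)]) [];
    let graph := arcs.foldl (fun g e => PySem.List.pySetD g e.1 (PySem.List.pyGetD g e.1 [] ++ [e.2])) (List.replicate m ([] : List Int));
    let dist := pvRounds graph (m + 1) 0 (PySem.List.pySetD (List.replicate m (-1 : Int)) destination 0, [destination]);
    sources.map (fun s => PySem.List.pyGetD dist s 0))
  simp only []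
  set N := (n + 1).toNat with hN
  have hNc : (N : Int) = n + 1 := by omega
  have hvd : pvVIdx N destination := by unfold pvVIdx; omega
  rw [pvBuild_eq]
  set graph := roads.foldl (fun g r => pvAddEdge (pvAddEdge g r.1 r.2) r.2 r.1) (List.replicate N ([] : List Int)) with hgraph
  obtain ⟨hgl, hge⟩ := pvBuild_spec N roads (List.replicate N ([] : List Int)) (by simp) (by simp)
    (by intro r hr; have := hroads r hr; constructor <;> (unfold pvVIdx; omega))
  set dist0 := PySem.List.pySetD (List.replicate N (-1 : Int)) destination 0 with hdist0
  have hset0 : dist0 = (List.replicate N (-1 : Int)).set (pvNidx N destination) 0 := by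
    rw [hdist0, pvSetD_valid _ _ _ (by simpa using hvd)]
    simp
  have hd0len : dist0.length = N := by rw [hset0]; simp
  have hd0get : dist0.getD (pvNidx N destination) 0 = 0 := by
    rw [hset0]
    exact getD_set_self _ _ _ (by simpa using pvNidx_lt hvd)
  have hd0cnt : pvCnt dist0 + 1 = N := by
    rw [hset0]
    rw [pvCnt_set _ _ _ (by simpa using pvNidx_lt hvd) (by
      rw [List.getD_eq_getElem _ _ (by simpa using pvNidx_lt hvd)]
      simp) (by omega)]
    exact pvCnt_replicate N
  have hkey := pvKey graph N hgl hge
    (2 * (pvCnt dist0 + ([destination] : List Int).length + ([] : List Int).length) + (if ([destination] : List Int) = [] then 1 else 0))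
    (N + 1) N dist0 [destination] [] 0 hd0len (le_refl 0)
    (by intro x hx; rw [List.mem_singleton.mp hx]; exact ⟨hvd, hd0get⟩)
    (by simp)
    (le_refl _)
    (by simp only [List.length_cons, List.length_nil]; omega)
    (by simp only [List.length_nil]; omega)
  simp only [List.append_nil] at hkey
  rw [pvRounds_eq]
  have hB : pvBfsB graph (N + 1) dist0 [destination] 0
      = pvBfsB graph N (([destination] : List Int).foldl (pvLevelB graph (0 + 1)) (dist0, [])).1
          (([destination] : List Int).foldl (pvLevelB graph (0 + 1)) (dist0, [])).2 (0 + 1) := rfl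
  rw [hB, ← hkey]
  rw [PySem.List.foldl_append_singleton_eq_map]
  exact List.nil_append _

-- ===== VERDICT (by name: the statement is the Claim_ definition above) =====
theorem solution_spec : Claim_equal_solution := by
  intro n roads sources destination _ hpre
  unfold Spec_solution
  exact solution_eq n roads sources destination hpre.1 hpre.2.1 hpre.2.2.1
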